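-- pv_equiv track=rewrite | github.com/AliceCros/API-JustifyText | justify_text_wrapper.py | check_double_spaces
-- ===== SOURCE A (Python) =====
-- def check_double_spaces(list_spaces_to_be_checked):
--     """
--
--         Args:
--             list_spaces_to_be_checked: list with potential double spaces to line break
--
--         Returns:
--             str_spaces_checked: string with no double spaces
--
--     """
--
--     str_spaces_checked = ""
--     double_space = 0
--
--     for line in list_spaces_to_be_checked:
--         for char in line:
--             if char == ' ':
--                 if double_space == 1:
--                     str_spaces_checked += '\n'
--                     double_space = 0
--                 else:
--                     str_spaces_checked += char
--                     double_space += 1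
--             else:
--                 str_spaces_checked += char
--                 double_space = 0
--         str_spaces_checked += '\n'
--
--     return str_spaces_checked
-- ===== SOURCE B (Python) =====
-- def check_double_spaces(list_spaces_to_be_checked):
--     # Flatten, do one non-overlapping replace of '  ' by ' \n' (this reproduces the
--     # greedy space-pairing state machine, including its carryover across lines),
--     # then cut the result back into the original line lengths, '\n'-terminating each.
--     flat = ''.join(list_spaces_to_be_checked)
--     transformed = flat.replace('  ', ' \n')
--     pieces = []
--     i = 0
--     for line in list_spaces_to_be_checked:
--         n = len(line)
--         pieces.append(transformed[i:i+n])
--         pieces.append('\n')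
--         i += n
--     return ''.join(pieces)
-- ===== Notes on version B (the rewrite author's own statement) =====
-- stated objective: faster
-- what changed: Replaces the per-character Python state-machine loop by one flatten + str.replace(' ',' \n') (which is exactly the greedy pairing, carryover across lines included) followed by slicing the result back into the original line lengths; intended as faster, probe measured ~1.7-1.8x at mid sizes.
import Mathlib
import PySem

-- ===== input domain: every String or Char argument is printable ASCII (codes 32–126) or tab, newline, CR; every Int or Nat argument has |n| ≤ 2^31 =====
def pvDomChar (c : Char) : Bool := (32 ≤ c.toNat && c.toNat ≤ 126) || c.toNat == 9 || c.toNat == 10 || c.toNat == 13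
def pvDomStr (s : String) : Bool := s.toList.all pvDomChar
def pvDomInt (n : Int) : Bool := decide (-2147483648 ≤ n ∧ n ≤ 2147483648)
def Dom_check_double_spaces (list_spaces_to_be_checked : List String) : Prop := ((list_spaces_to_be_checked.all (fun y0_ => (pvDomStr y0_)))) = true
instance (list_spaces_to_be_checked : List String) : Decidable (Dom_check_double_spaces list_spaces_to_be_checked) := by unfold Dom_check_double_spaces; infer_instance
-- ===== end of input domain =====

-- B replaces A's per-character state-machine loop by flatten + replace("  "," \n") + resplit by line lengths; intended as faster (timing run measured ~1.7-1.8x at mid sizes; largest size not confirmed).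


-- ===== PORT A =====
def check_double_spaces (list_spaces_to_be_checked : List String) : String :=
  let st := list_spaces_to_be_checked.foldl (fun (st : List Char × Int) line =>
      let st2 := line.toList.foldl (fun (st : List Char × Int) c =>
          if c = ' ' then
            (if st.2 = 1 then (st.1 ++ ['\n'], 0) else (st.1 ++ [c], st.2 + 1))
          else (st.1 ++ [c], 0)) st
      (st2.1 ++ ['\n'], st2.2)) ([], 0)
  String.mk st.1

-- ===== PORT B =====
def check_double_spaces_alt (list_spaces_to_be_checked : List String) : String :=
  let flat := PySem.Str.join "" list_spaces_to_be_checked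
  let transformed := PySem.Chars.replace flat.toList "  ".toList " \n".toList
  let st := list_spaces_to_be_checked.foldl (fun (st : List (List Char) × Int) line =>
      (st.1 ++ [PySem.Chars.slice transformed (some st.2) (some (st.2 + PySem.Str.len line)), ['\n']],
       st.2 + PySem.Str.len line)) ([], 0)
  String.mk (PySem.Chars.join [] st.1)

-- ===== PRECONDITION & SPEC =====
def Spec_check_double_spaces (list_spaces_to_be_checked : List String) (out : String) : Prop := out = check_double_spaces_alt list_spaces_to_be_checked
instance (list_spaces_to_be_checked : List String) (out : String) : Decidable (Spec_check_double_spaces list_spaces_to_be_checked out) := by unfold Spec_check_double_spaces; infer_instance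

-- ===== CLAIM (what is proved, stated in full; the proofs are below) =====
def Claim_equal_check_double_spaces : Prop := ∀ (list_spaces_to_be_checked : List String), Dom_check_double_spaces list_spaces_to_be_checked → Spec_check_double_spaces list_spaces_to_be_checked (check_double_spaces list_spaces_to_be_checked)

-- ===== LEMMAS AND PROOFS =====

/-- A's per-character transducer: the characters it emits. -/
def smF : Int → List Char → List Char
  | _, [] => []
  | ds, c :: t => if c = ' ' then (if ds = 1 then '\n' :: smF 0 t else c :: smF (ds + 1) t) else c :: smF 0 t

/-- The transducer's final state. -/
def smS : Int → List Char → Int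
  | ds, [] => ds
  | ds, c :: t => if c = ' ' then (if ds = 1 then smS 0 t else smS (ds + 1) t) else smS 0 t

/-- The whole-output spec: per line the emitted chars plus a newline, state threaded. -/
def outSpec : Int → List String → List Char
  | _, [] => []
  | ds, s :: rest => smF ds s.toList ++ '\n' :: outSpec (smS ds s.toList) rest

theorem smF_length (cs : List Char) : ∀ ds, (smF ds cs).length = cs.length := by
  induction cs with
  | nil => intro ds; rfl
  | cons c t ih => intro ds; simp only [smF]; split_ifs <;> simp [ih]

theorem smF_append (xs : List Char) : ∀ ys ds, smF ds (xs ++ ys) = smF ds xs ++ smF (smS ds xs) ys := by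
  induction xs with
  | nil => intro ys ds; rfl
  | cons c t ih => intro ys ds; simp only [List.cons_append, smF, smS]; split_ifs <;> simp [ih]

theorem smF_one_eq_zero : ∀ (t : List Char), (∀ c' t', t = c' :: t' → c' ≠ ' ') → smF 1 t = smF 0 t := by
  intro t h
  cases t with
  | nil => rfl
  | cons c' t' =>
    have : c' ≠ ' ' := h c' t' rfl
    simp [smF, this]

theorem replace_go_eq_smF : ∀ (fuel : Nat) (l acc : List Char), l.length ≤ fuel →
    PySem.Chars.replace.go [' ', ' '] [' ', '\n'] fuel l acc = acc.reverse ++ smF 0 l := by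
  intro fuel
  induction fuel with
  | zero =>
    intro l acc h
    have : l = [] := List.eq_nil_of_length_eq_zero (Nat.le_zero.mp h)
    subst this; simp [PySem.Chars.replace.go, smF]
  | succ n ih =>
    intro l acc h
    cases l with
    | nil => simp [PySem.Chars.replace.go, smF]
    | cons c t =>
      rw [PySem.Chars.replace.go]
      by_cases hp : [' ', ' '].isPrefixOf (c :: t) = true
      · obtain ⟨t', rfl, rfl⟩ : ∃ t', c = ' ' ∧ t = ' ' :: t' := by
          cases t with
          | nil => simp [List.isPrefixOf] at hp
          | cons c' t' =>
            simp only [List.isPrefixOf, Bool.and_eq_true, beq_iff_eq] at hp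
            exact ⟨t', hp.1.symm, by simpa using hp.2.1.symm⟩
        simp only [hp, if_true]
        rw [ih _ _ (by simp at h ⊢; omega)]
        simp [smF]
      · simp only [hp, if_false, Bool.false_eq_true]
        rw [ih t (c :: acc) (by simpa using Nat.le_of_succ_le_succ h)]
        by_cases hc : c = ' '
        · subst hc
          have ht : ∀ c' t', t = c' :: t' → c' ≠ ' ' := by
            intro c' t' he hcs
            subst he; subst hcs
            simp [List.isPrefixOf] at hp
          simp [smF, smF_one_eq_zero t ht]
        · simp [smF, hc]

theorem replace_eq_smF (l : List Char) :
    PySem.Chars.replace l [' ', ' '] [' ', '\n'] = smF 0 l := by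
  rw [PySem.Chars.replace]
  simp only [List.isEmpty_cons, if_false, Bool.false_eq_true]
  simpa using replace_go_eq_smF l.length l [] (Nat.le_refl _)

theorem inner_loop_eq (cs : List Char) : ∀ (acc : List Char) (ds : Int),
    cs.foldl (fun (st : List Char × Int) c =>
        if c = ' ' then
          (if st.2 = 1 then (st.1 ++ ['\n'], 0) else (st.1 ++ [c], st.2 + 1))
        else (st.1 ++ [c], 0)) (acc, ds) = (acc ++ smF ds cs, smS ds cs) := by
  induction cs with
  | nil => intro acc ds; simp [smF, smS]
  | cons c t ih =>
    intro acc ds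
    simp only [List.foldl_cons, smF, smS]
    split_ifs with h1 h2 <;> simp [ih]

theorem outer_loop_eq (lst : List String) : ∀ (acc : List Char) (ds : Int),
    (lst.foldl (fun (st : List Char × Int) line =>
        let st2 := line.toList.foldl (fun (st : List Char × Int) c =>
            if c = ' ' then
              (if st.2 = 1 then (st.1 ++ ['\n'], 0) else (st.1 ++ [c], st.2 + 1))
            else (st.1 ++ [c], 0)) st
        (st2.1 ++ ['\n'], st2.2)) (acc, ds)).1 = acc ++ outSpec ds lst := by
  induction lst with
  | nil => intro acc ds; simp [outSpec]
  | cons s rest ih =>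
    intro acc ds
    simp only [List.foldl_cons, inner_loop_eq, outSpec, ih]
    simp

theorem chars_join_nil (l : List (List Char)) : PySem.Chars.join [] l = l.flatten := by
  rw [PySem.Chars.join]
  induction l with
  | nil => rfl
  | cons x xs ih =>
    cases xs with
    | nil => simp [List.intercalate]
    | cons y ys =>
      simp only [List.intercalate] at ih ⊢
      simp_all

theorem join_empty_toList (lst : List String) :
    (PySem.Str.join "" lst).toList = (lst.map String.toList).flatten := by
  rw [PySem.Str.toList_join]
  exact chars_join_nil _

theorem bfold_eq (T : List Char) (lst : List String) : ∀ (P : List Char) (acc : List (List Char)) (ds : Int),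
    T = P ++ smF ds ((lst.map String.toList).flatten) →
    (lst.foldl (fun (st : List (List Char) × Int) line =>
        (st.1 ++ [PySem.Chars.slice T (some st.2) (some (st.2 + PySem.Str.len line)), ['\n']],
         st.2 + PySem.Str.len line)) (acc, (P.length : Int))).1.flatten = acc.flatten ++ outSpec ds lst := by
  induction lst with
  | nil => intro P acc ds _; simp [outSpec]
  | cons s rest ih =>
    intro P acc ds hT
    have hflat : (((s :: rest).map String.toList).flatten) = s.toList ++ (rest.map String.toList).flatten := by simp
    rw [hflat, smF_append] at hT
    have hsl : PySem.Chars.slice T (some (P.length : Int)) (some ((P.length : Int) + PySem.Str.len s))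
        = smF ds s.toList := by
      rw [PySem.Str.len_eq, PySem.Chars.slice_eq_listSlice]
      have := PySem.List.slice_natCast_add T P.length s.toList.length
      rw [this, hT]
      rw [List.drop_append_of_le_length (Nat.le_refl _)]
      simp [smF_length]
    simp only [List.foldl_cons]
    have hlen : (P.length : Int) + PySem.Str.len s = ((P ++ smF ds s.toList).length : Int) := by
      rw [PySem.Str.len_eq]; simp [smF_length]
    rw [hsl, hlen, ih (P ++ smF ds s.toList) _ (smS ds s.toList) (by rw [hT]; simp)]
    simp [outSpec]

theorem check_double_spaces_spec' (lst : List String) :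
    check_double_spaces lst = check_double_spaces_alt lst := by
  unfold check_double_spaces check_double_spaces_alt
  have hT : PySem.Chars.replace (PySem.Str.join "" lst).toList "  ".toList " \n".toList
      = smF 0 ((lst.map String.toList).flatten) := by
    rw [join_empty_toList]
    exact replace_eq_smF _
  simp only [outer_loop_eq lst [] 0]
  have := bfold_eq (PySem.Chars.replace (PySem.Str.join "" lst).toList "  ".toList " \n".toList)
      lst [] [] 0 (by simpa using hT)
  simp only [List.length_nil, Nat.cast_zero, List.flatten_nil, List.nil_append] at this
  rw [chars_join_nil, this]; simp

-- ===== VERDICT (by name: the statement is the Claim_ definition above) =====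
theorem check_double_spaces_spec : Claim_equal_check_double_spaces := by
  intro lst _
  unfold Spec_check_double_spaces
  exact check_double_spaces_spec' lst
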